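-- pv_equiv track=rewrite | github.com/sustainable-processes/summit | summit/strategies/general_subset_design.py | _make_partitions
-- ===== SOURCE A (Python) =====
-- def _make_partitions(factor_levels, num_partitions):
--     """
--     Balanced partitioning of factors.
--     """
--     partitions = list()
--     for partition_i in range(1, num_partitions + 1):
--         partition = list()
--
--         for num_levels in factor_levels:
--             part = list()
--             for level_i in range(1, num_levels):
--                 index = partition_i + (level_i - 1) * num_partitions
--                 if index <= num_levels:
--                     part.append(index)
--
--             partition.append(part)
--
--         partitions.append(partition)
--
--     return partitions
-- ===== SOURCE B (Python) =====
-- def _make_partitions(factor_levels, num_partitions):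
--     """
--     Balanced partitioning of factors.
--     """
--     if num_partitions <= 0:
--         return []
--     # For each factor, deal the candidate indices 1..n round-robin into the
--     # num_partitions buckets in a single pass, keeping at most n - 1 per bucket;
--     # then transpose the per-factor bucket tables into the per-partition layout.
--     per_factor = []
--     for n in factor_levels:
--         buckets = [[] for _ in range(num_partitions)]
--         for i in range(1, n + 1):
--             buckets[(i - 1) % num_partitions].append(i)
--         per_factor.append([b[: n - 1] for b in buckets])
--     return [[table[p] for table in per_factor] for p in range(num_partitions)]
-- ===== Notes on version B (the rewrite author's own statement) =====
-- stated objective: alternative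
-- what changed: B builds all partitions of a factor at once: one round-robin dealing pass of the indices 1..n into num_partitions buckets per factor (capped at n-1 per bucket), then a transpose into the per-partition layout, instead of A's rescan of every level of every factor for every partition; it avoids A's per-partition inner scans but the measured speed-up did not reach the check's threshold on output-dominated inputs.
import Mathlib
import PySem

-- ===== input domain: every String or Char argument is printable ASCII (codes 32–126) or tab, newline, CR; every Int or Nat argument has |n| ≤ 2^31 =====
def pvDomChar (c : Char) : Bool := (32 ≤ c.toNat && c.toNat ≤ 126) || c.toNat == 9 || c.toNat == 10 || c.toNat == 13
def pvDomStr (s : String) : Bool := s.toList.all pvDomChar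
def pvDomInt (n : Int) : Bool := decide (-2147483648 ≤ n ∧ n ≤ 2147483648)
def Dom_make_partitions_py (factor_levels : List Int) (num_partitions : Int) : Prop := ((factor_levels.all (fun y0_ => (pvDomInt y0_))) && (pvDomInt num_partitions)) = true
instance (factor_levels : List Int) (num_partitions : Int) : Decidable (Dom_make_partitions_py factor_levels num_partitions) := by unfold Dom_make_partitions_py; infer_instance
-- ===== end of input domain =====

-- B builds all partitions of a factor simultaneously: one round-robin dealing pass of the
-- indices 1..n into num_partitions buckets per factor, then a transpose into the
-- per-partition layout — instead of A's rescan of every level for every partition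
-- (objective: alternative algorithm; A's per-partition inner scans disappear).

-- ===== PORT A =====
def make_partitions_py (factor_levels : List Int) (num_partitions : Int) : List (List (List Int)) :=
  (PySem.List.pyRange 1 (num_partitions + 1) 1).foldl (fun partitions partition_i =>
    partitions ++ [
      factor_levels.foldl (fun partition num_levels =>
        partition ++ [
          (PySem.List.pyRange 1 num_levels 1).foldl (fun part level_i =>
            let index := partition_i + (level_i - 1) * num_partitions
            if index ≤ num_levels then part ++ [index] else part) [] ]) [] ]) []

-- ===== PORT B =====
-- buckets[(i-1) % num_partitions].append(i): the index is in range (0 ≤ (i-1) % k < k =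
-- len(buckets) since num_partitions > 0 on this branch), so pyGetD/pySetD are exact here.
def make_partitions_py_alt (factor_levels : List Int) (num_partitions : Int) : List (List (List Int)) :=
  if num_partitions ≤ 0 then []
  else
    let per_factor := factor_levels.foldl (fun per_factor n =>
      let buckets0 := (PySem.List.pyRange 0 num_partitions 1).map (fun _ => ([] : List Int))
      let buckets := (PySem.List.pyRange 1 (n + 1) 1).foldl (fun bs i =>
        let j := PySem.Int.mod (i - 1) num_partitions
        PySem.List.pySetD bs j (PySem.List.pyGetD bs j [] ++ [i])) buckets0
      per_factor ++ [buckets.map (fun b => PySem.List.slice b none (some (n - 1)))]) []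
    (PySem.List.pyRange 0 num_partitions 1).map (fun p =>
      per_factor.map (fun table => PySem.List.pyGetD table p []))

-- ===== PRECONDITION & SPEC =====
def Spec_make_partitions_py (factor_levels : List Int) (num_partitions : Int) (out : List (List (List Int))) : Prop := out = make_partitions_py_alt factor_levels num_partitions
instance (factor_levels : List Int) (num_partitions : Int) (out : List (List (List Int))) : Decidable (Spec_make_partitions_py factor_levels num_partitions out) := by unfold Spec_make_partitions_py; infer_instance

-- ===== CLAIM (what is proved, stated in full; the proofs are below) =====
def Claim_equal_make_partitions_py : Prop := ∀ (factor_levels : List Int) (num_partitions : Int), Dom_make_partitions_py factor_levels num_partitions → Spec_make_partitions_py factor_levels num_partitions (make_partitions_py factor_levels num_partitions)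

-- ===== LEMMAS AND PROOFS =====

-- a positive-step range with start ≥ stop is empty
lemma pyRange_nil_of_le (a b k : Int) (hk : 0 < k) (h : b ≤ a) :
    PySem.List.pyRange a b k = [] := by
  rw [PySem.List.pyRange_of_pos a b hk]
  have : ¬ a < b := by omega
  simp [this]

-- extending the stop of a positive-step range by one
lemma pyRange_succ_right (a b k : Int) (hk : 0 < k) (hab : a - b < k) :
    PySem.List.pyRange a (b + 1) k
      = PySem.List.pyRange a b k ++ (if (b - a) % k = 0 then [b] else []) := by
  rw [PySem.List.pyRange_of_pos a (b + 1) hk, PySem.List.pyRange_of_pos a b hk]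
  by_cases hlt : a < b + 1
  · simp only [hlt, if_pos]
    rcases eq_or_lt_of_le (by omega : a ≤ b) with heq | hab'
    · subst heq
      rw [if_neg (lt_irrefl a), show (a + 1 - a + k - 1) = k from by ring,
        Int.ediv_self (by omega : k ≠ 0)]
      simp [List.range_succ]
    · simp only [hab', if_pos]
      set q := (b - a) / k with hq
      set r := (b - a) % k with hr
      have hqr : k * q + r = b - a := Int.ediv_add_emod (b - a) k
      have hr0 : 0 ≤ r := Int.emod_nonneg _ (by omega)
      have hrk : r < k := Int.emod_lt_of_pos _ hk
      by_cases hrz : r = 0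
      · have hqpos : 0 < q := by nlinarith
        have hN1 : ((b - a + k - 1) / k).toNat = q.toNat := by
          have : b - a + k - 1 = (k - 1) + q * k := by
            rw [show b - a + k - 1 = (b - a) + k - 1 from by ring, ← hqr, hrz]; ring
          rw [this, Int.add_mul_ediv_right _ _ (by omega : k ≠ 0),
            Int.ediv_eq_zero_of_lt (by omega) (by omega)]
          simp
        have hN2 : ((b + 1 - a + k - 1) / k).toNat = q.toNat + 1 := by
          have : b + 1 - a + k - 1 = 0 + (q + 1) * k := by
            rw [show b + 1 - a + k - 1 = (b - a) + k from by ring, ← hqr, hrz]; ring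
          rw [this, Int.add_mul_ediv_right _ _ (by omega : k ≠ 0),
            Int.zero_ediv]
          omega
        rw [hN1, hN2, List.range_succ, List.map_append]
        simp only [hrz, if_pos, List.map_cons, List.map_nil]
        congr 2
        have : (q.toNat : Int) = q := Int.toNat_of_nonneg (by omega)
        rw [this]; omega
      · have hN12 : (b + 1 - a + k - 1) / k = (b - a + k - 1) / k := by
          have e1 : b - a + k - 1 = (r + k - 1) + q * k := by
            rw [show b - a + k - 1 = (b - a) + k - 1 from by ring, ← hqr]; ring
          have e2 : b + 1 - a + k - 1 = (r + k) + q * k := by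
            rw [show b + 1 - a + k - 1 = (b - a) + k from by ring, ← hqr]; ring
          rw [e1, e2, Int.add_mul_ediv_right _ _ (by omega : k ≠ 0),
            Int.add_mul_ediv_right _ _ (by omega : k ≠ 0)]
          have d1 : (r + k - 1) / k = 1 := by
            have : r + k - 1 = (r - 1) + 1 * k := by ring
            rw [this, Int.add_mul_ediv_right _ _ (by omega : k ≠ 0),
              Int.ediv_eq_zero_of_lt (by omega) (by omega)]
            norm_num
          have d2 : (r + k) / k = 1 := by
            have : r + k = r + 1 * k := by ring
            rw [this, Int.add_mul_ediv_right _ _ (by omega : k ≠ 0),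
              Int.ediv_eq_zero_of_lt (by omega) (by omega)]
            norm_num
          rw [d1, d2]
        rw [hN12]
        simp [hrz]
  · -- b < a: both ranges empty and the divisibility test cannot fire (-k < b - a < 0)
    have hba : b < a := by omega
    have h2 : ¬ a < b := by omega
    have hcond : ¬ (b - a) % k = 0 := by
      intro h0
      have hdvd : k ∣ b - a := Int.dvd_of_emod_eq_zero h0
      have hdvd' : k ∣ a - b := by
        rw [show a - b = -(b - a) from by ring]
        exact dvd_neg.mpr hdvd
      have := Int.le_of_dvd (by omega) hdvd'
      omega
    simp [hlt, h2, hcond]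

-- setting one position of a mapped range pointwise
lemma set_map_range {α : Type} (K : Nat) (f : Nat → α) (j : Nat) (hj : j < K) (v : α) :
    ((List.range K).map f).set j v
      = (List.range K).map (fun t => if t = j then v else f t) := by
  apply List.ext_getElem
  · simp
  · intro i h1 h2
    simp only [List.length_set, List.length_map, List.length_range] at h1
    rw [List.getElem_set]
    by_cases hij : i = j
    · simp [hij]
    · simp [hij, Ne.symm hij]

-- dealing 1..m round-robin into k buckets yields the arithmetic progressions
lemma dealNat (k : Int) (hk : 0 < k) (m : Nat) :
    (PySem.List.pyRange 1 ((m : Int) + 1) 1).foldl (fun bs i =>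
        PySem.List.pySetD bs (PySem.Int.mod (i - 1) k)
          (PySem.List.pyGetD bs (PySem.Int.mod (i - 1) k) [] ++ [i]))
      ((PySem.List.pyRange 0 k 1).map (fun _ => ([] : List Int)))
    = (List.range k.toNat).map (fun (j : Nat) => PySem.List.pyRange ((j : Int) + 1) ((m : Int) + 1) k) := by
  induction m with
  | zero =>
    rw [PySem.List.pyRange_zero, List.map_map]
    rw [show ((0 : Nat) : Int) + 1 = (1 : Int) from by norm_num]
    rw [PySem.List.pyRange_one_eq_nil (le_refl (1 : Int)), List.foldl_nil]
    apply List.map_congr_left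
    intro j _
    rw [pyRange_nil_of_le _ _ _ hk (by omega)]
    simp
  | succ m ih =>
    have hcast : ((m + 1 : Nat) : Int) + 1 = ((m : Int) + 1) + 1 := by push_cast; ring
    rw [hcast, PySem.List.pyRange_one_succ_right (by omega), List.foldl_append, ih]
    simp only [List.foldl_cons, List.foldl_nil]
    have hmod : PySem.Int.mod ((m : Int) + 1 - 1) k = ((m % k.toNat : Nat) : Int) := by
      rw [PySem.Int.mod_eq_emod_of_pos hk]
      have hkc : (k.toNat : Int) = k := Int.toNat_of_nonneg (by omega)
      push_cast
      rw [hkc]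
      simp
    set K := k.toNat with hK
    have hK0 : 0 < K := by omega
    have hj : m % K < K := Nat.mod_lt _ hK0
    rw [hmod, PySem.List.pySetD_natCast, PySem.List.pyGetD_natCast,
      List.getD_eq_getElem _ _ (by simp [hj]), List.getElem_map, List.getElem_range,
      set_map_range K _ _ hj]
    apply List.map_congr_left
    intro j hjm
    rw [List.mem_range] at hjm
    rw [pyRange_succ_right ((j : Int) + 1) ((m : Int) + 1) k hk (by push_cast; omega)]
    have hcond : ((m : Int) + 1 - ((j : Int) + 1)) % k = 0 ↔ j = m % K := by
      have hkc : (k.toNat : Int) = k := Int.toNat_of_nonneg (by omega)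
      constructor
      · intro h0
        have hdvd : k ∣ (m : Int) - j := by
          have e : (m : Int) + 1 - ((j : Int) + 1) = (m : Int) - j := by ring
          rw [e] at h0
          exact Int.dvd_of_emod_eq_zero h0
        have hmm : ((m : Int)) % k = ((j : Int)) % k :=
          Int.emod_eq_emod_iff_emod_sub_eq_zero.mpr (Int.emod_eq_zero_of_dvd hdvd)
        have hjj : ((j : Int)) % k = (j : Int) :=
          Int.emod_eq_of_lt (by omega) (by omega)
        have hcm : ((m % K : Nat) : Int) = (m : Int) % k := by
          push_cast
          rw [hkc]
        have hji : (j : Int) = ((m % K : Nat) : Int) := by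
          rw [← hjj, ← hmm, hcm]
        exact_mod_cast hji
      · intro h0
        subst h0
        have e : (m : Int) + 1 - (((m % K : Nat) : Int) + 1) = (m : Int) - ((m % K : Nat) : Int) := by
          ring
        rw [e]
        apply Int.emod_eq_zero_of_dvd
        refine ⟨((m / K : Nat) : Int), ?_⟩
        have h2 : ((m % K : Nat) : Int) + (K : Int) * ((m / K : Nat) : Int) = (m : Int) := by
          exact_mod_cast Nat.mod_add_div m K
        rw [← hkc]
        linarith [h2]
    by_cases hc : j = m % K
    · rw [if_pos hc, if_pos (hcond.mpr hc), hc]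
    · rw [if_neg hc, if_neg (fun h => hc (hcond.mp h))]
      simp

-- the dealing fold for an arbitrary (possibly ≤ 0) number of levels n
lemma deal (k n : Int) (hk : 0 < k) :
    (PySem.List.pyRange 1 (n + 1) 1).foldl (fun bs i =>
        PySem.List.pySetD bs (PySem.Int.mod (i - 1) k)
          (PySem.List.pyGetD bs (PySem.Int.mod (i - 1) k) [] ++ [i]))
      ((PySem.List.pyRange 0 k 1).map (fun _ => ([] : List Int)))
    = (List.range k.toNat).map (fun (j : Nat) => PySem.List.pyRange ((j : Int) + 1) (n + 1) k) := by
  rcases le_or_gt n 0 with hn | hn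
  · rw [PySem.List.pyRange_zero, List.map_map]
    rw [PySem.List.pyRange_one_eq_nil (by omega : n + 1 ≤ 1), List.foldl_nil]
    apply List.map_congr_left
    intro j _
    rw [pyRange_nil_of_le _ _ _ hk (by omega)]
    simp
  · have hcast : ((n.toNat : Nat) : Int) = n := Int.toNat_of_nonneg (by omega)
    have := dealNat k hk n.toNat
    rw [hcast] at this
    exact this

-- generic: filtering `range M` by `k < N` is `range (min M N)`
lemma filter_lt_range (M N : Nat) : (List.range M).filter (fun k => decide (k < N)) = List.range (min M N) := by
  induction M with
  | zero => simp
  | succ m ih =>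
    rw [List.range_succ, List.filter_append, ih]
    by_cases h : m < N
    · have h1 : min (m + 1) N = m + 1 := by omega
      have h2 : min m N = m := by omega
      rw [h1, h2, List.range_succ]
      simp [h]
    · have h1 : min (m + 1) N = min m N := by omega
      rw [h1]
      simp [h]

-- core: A's inner scan over levels equals the sliced arithmetic progression
lemma core (p q n : Int) (hp : 1 ≤ p) (hq : 1 ≤ q) :
    (PySem.List.pyRange 1 n 1).foldl (fun part level_i =>
        let index := p + (level_i - 1) * q
        if index ≤ n then part ++ [index] else part) ([] : List Int)
    = PySem.List.slice (PySem.List.pyRange p (n + 1) q) none (some (n - 1)) := by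
  rw [show (fun part level_i =>
        let index := p + (level_i - 1) * q
        if index ≤ n then part ++ [index] else part)
      = (fun (part : List Int) (level_i : Int) =>
        if p + (level_i - 1) * q ≤ n then part ++ [p + (level_i - 1) * q] else part) from rfl]
  rw [PySem.List.foldl_append_ite]
  rcases le_or_gt n 0 with hn | hn
  · rw [PySem.List.pyRange_one_eq_nil (by omega)]
    rw [PySem.List.pyRange_of_pos _ _ hq]
    have : ¬ p < n + 1 := by omega
    simp [this, PySem.List.slice]
  · rw [PySem.List.slice_to _ (by omega)]
    rw [PySem.List.pyRange_of_pos _ _ hq, PySem.List.pyRange_one]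
    rw [List.filter_map, ← List.map_take, List.take_range]
    rcases le_or_gt p n with hpn | hpn
    · have hplt : p < n + 1 := by omega
      simp only [hplt, if_pos]
      set NB : Nat := ((n + 1 - p + q - 1) / q).toNat with hNB
      have hpred : ∀ k : Nat, (((fun l => decide (p + (l - 1) * q ≤ n)) ∘ fun k : Nat => 1 + (k : Int)) k) = decide (k < NB) := by
        intro k
        simp only [Function.comp]
        have hiff : p + (1 + (k : Int) - 1) * q ≤ n ↔ k < NB := by
          have hq0 : (0 : Int) < q := by omega
          have hdiv : ∀ m : Int, m ≤ (n + 1 - p + q - 1) / q ↔ m * q ≤ n + 1 - p + q - 1 :=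
            fun m => Int.le_ediv_iff_mul_le hq0
          constructor
          · intro h
            have h1 : ((k : Int) + 1) * q ≤ n + 1 - p + q - 1 := by ring_nf; ring_nf at h; omega
            have h2 : (k : Int) + 1 ≤ (n + 1 - p + q - 1) / q := (hdiv _).mpr h1
            have h3 : 0 ≤ (n + 1 - p + q - 1) / q := by
              have := (hdiv 0).mpr (by omega); omega
            omega
          · intro h
            have h2 : (k : Int) + 1 ≤ (n + 1 - p + q - 1) / q := by
              have h3 : 0 ≤ (n + 1 - p + q - 1) / q := by
                have := (hdiv 0).mpr (by omega); omega
              omega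
            have h1 := (hdiv _).mp h2
            ring_nf; ring_nf at h1; omega
        have hk : (1 + (k : Int) - 1) = (k : Int) := by ring
        rw [hk] at hiff
        simp [hiff]
      rw [List.filter_congr (fun k _ => hpred k), filter_lt_range]
      simp only [List.nil_append, List.map_map]
      apply List.map_congr_left
      intro k _
      simp only [Function.comp]
      ring
    · have hnb : ¬ p < n + 1 := by omega
      simp only [hnb]
      have : ∀ k ∈ List.range (n - 1).toNat,
          (((fun l => decide (p + (l - 1) * q ≤ n)) ∘ fun k : Nat => 1 + (k : Int)) k) = false := by
        intro k _
        have hkq : 0 ≤ (k : Int) * q := mul_nonneg (Int.natCast_nonneg k) (by omega)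
        simp only [Function.comp]
        simp
        linarith
      rw [List.filter_congr this]
      simp

-- ===== VERDICT (by name: the statement is the Claim_ definition above) =====
theorem make_partitions_py_spec : Claim_equal_make_partitions_py := by
  intro factor_levels k _
  unfold Spec_make_partitions_py make_partitions_py make_partitions_py_alt
  rcases le_or_gt k 0 with hk | hk
  · rw [if_pos hk, PySem.List.pyRange_one_eq_nil (by omega), List.foldl_nil]
  · rw [if_neg (by omega)]
    rw [PySem.List.foldl_append_singleton_eq_map]
    rw [PySem.List.foldl_append_singleton_eq_map]
    simp only [List.nil_append]
    simp only [deal (k := k) (hk := hk)]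
    rw [PySem.List.pyRange_one 1 (k + 1), PySem.List.pyRange_one 0 k]
    simp only [show (k + 1 - 1).toNat = (k - 0).toNat from by omega, List.map_map]
    apply List.map_congr_left
    intro t ht
    rw [List.mem_range] at ht
    simp only [Function.comp, List.map_map]
    rw [PySem.List.foldl_append_singleton_eq_map]
    simp only [List.nil_append]
    apply List.map_congr_left
    intro n _
    simp only [Function.comp, List.map_map]
    have hidx : (0 : Int) + (t : Int) = ((t : Int)) := by ring
    rw [hidx, PySem.List.pyGetD_natCast,
      List.getD_eq_getElem _ _ (by simp; omega), List.getElem_map, List.getElem_range]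
    have h1t : (1 : Int) + (t : Int) = (t : Int) + 1 := by ring
    rw [h1t]
    exact core ((t : Int) + 1) k n (by omega) (by omega)
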